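-- pv_equiv track=rewrite | github.com/yield-basis/yb-research-scripts | scripts/plot_fundamental_value_split.py | merge_feeds
-- ===== SOURCE A (Python) =====
-- def merge_feeds(times, values):
--     time_to_value = []
--     merged_times = set()
--     for idx in range(len(times)):
--         time_to_value.append(
--             {t: v for t, v in zip(times[idx], values[idx])}
--         )
--         merged_times.update(times[idx])
--     merged_times = sorted(list(merged_times))
--     running_values = [0] * len(times)
--     output_values = []
--     for t in merged_times:
--         for idx in range(len(times)):
--             if t in time_to_value[idx]:
--                 running_values[idx] = time_to_value[idx][t]
--         output_values.append(sum(running_values))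
--     return merged_times, output_values
-- ===== SOURCE B (Python) =====
-- def merge_feeds(times, values):
--     # Per-feed sorted two-pointer merge: sort each feed's samples once, then for
--     # each feed sweep the merged timeline forward-filling its value and adding it
--     # into the running output column.
--     merged_times = sorted({t for ts in times for t in ts})
--     output_values = [0] * len(merged_times)
--     for feed_times, feed_values in zip(times, values):
--         items = sorted(dict(zip(feed_times, feed_values)).items(), key=lambda kv: kv[0])
--         new_out = []
--         cur = 0
--         j = 0
--         for t, acc in zip(merged_times, output_values):
--             while j < len(items) and items[j][0] <= t:
--                 cur = items[j][1]
--                 j += 1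
--             new_out.append(acc + cur)
--         output_values = new_out
--     return merged_times, output_values
-- ===== Notes on version B (the rewrite author's own statement) =====
-- stated objective: alternative
-- what changed: B swaps the loop nesting and the merge strategy: instead of A's time-major sweep that probes every feed's hash dict at every merged time and re-sums a running vector, B processes one feed at a time, sorting that feed's samples once and forward-filling its value along the merged timeline with a two-pointer sorted merge, accumulating directly into the output column.
import Mathlib
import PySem

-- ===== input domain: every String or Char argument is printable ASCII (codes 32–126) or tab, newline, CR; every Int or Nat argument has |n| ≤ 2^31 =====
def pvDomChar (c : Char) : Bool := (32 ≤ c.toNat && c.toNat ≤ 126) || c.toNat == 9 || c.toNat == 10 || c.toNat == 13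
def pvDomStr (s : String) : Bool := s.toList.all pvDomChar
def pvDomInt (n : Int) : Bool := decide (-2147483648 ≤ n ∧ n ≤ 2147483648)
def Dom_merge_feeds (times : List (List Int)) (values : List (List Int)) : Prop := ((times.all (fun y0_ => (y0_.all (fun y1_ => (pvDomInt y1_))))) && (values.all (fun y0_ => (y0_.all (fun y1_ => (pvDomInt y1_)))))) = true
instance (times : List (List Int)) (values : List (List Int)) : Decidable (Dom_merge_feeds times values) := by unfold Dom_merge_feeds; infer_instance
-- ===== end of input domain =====

-- B replaces A's time-major sweep (probing every feed's dict at every merged time over a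
-- running vector) by a feed-major pass: each feed's samples are sorted once and merged
-- into the output column with a two-pointer forward fill (alternative decomposition).

-- ===== PORT A =====
def merge_feeds (times : List (List Int)) (values : List (List Int)) : List Int × List Int :=
  -- first loop: time_to_value list of dicts + merged_times set
  let st := (PySem.List.pyRange 0 times.length 1).foldl
    (fun (st : List (PySem.Dict Int Int) × PySem.Set Int) idx =>
      (st.1 ++ [PySem.Dict.ofList ((PySem.List.pyGetD times idx []).zip (PySem.List.pyGetD values idx []))],
       PySem.Set.update st.2 (PySem.List.pyGetD times idx [])))
    ([], PySem.Set.empty)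
  let ttv := st.1
  let merged := PySem.List.sorted st.2 (fun x => x) false
  -- second loop: sweep merged times, scanning every feed's dict
  let fin := merged.foldl
    (fun (st2 : List Int × List Int) t =>
      let running := (PySem.List.pyRange 0 times.length 1).foldl
        (fun (r : List Int) idx =>
          if (PySem.List.pyGetD ttv idx PySem.Dict.empty).contains t then
            r.set idx.toNat ((PySem.List.pyGetD ttv idx PySem.Dict.empty).getD t 0)
          else r)
        st2.1
      (running, st2.2 ++ [running.sum]))
    (List.replicate times.length 0, [])
  (merged, fin.2)

-- ===== PORT B =====
-- inner 'while j < len(items) and items[j][0] <= t' pointer, ported as consuming the suffix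
def mfAdvance : List (Int × Int) → Int → Int → List (Int × Int) × Int
  | [], cur, _ => ([], cur)
  | p :: rest, cur, t => if p.1 ≤ t then mfAdvance rest p.2 t else (p :: rest, cur)

-- 'for t, acc in zip(merged_times, output_values): … new_out.append(acc + cur)'
def mfFill : List (Int × Int) → Int → List (Int × Int) → List Int
  | _, _, [] => []
  | items, cur, ta :: rest =>
    match mfAdvance items cur ta.1 with
    | (items', cur') => (ta.2 + cur') :: mfFill items' cur' rest

def merge_feeds_alt (times : List (List Int)) (values : List (List Int)) : List Int × List Int :=
  let merged := PySem.List.sorted (PySem.Set.ofList (times.flatMap (fun x => x))) (fun x => x) false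
  let out := (times.zip values).foldl
    (fun (out : List Int) fv =>
      mfFill (PySem.List.sorted (PySem.Dict.ofList (fv.1.zip fv.2)).items (fun kv => kv.1) false) 0
        (merged.zip out))
    (List.replicate merged.length 0)
  (merged, out)

-- ===== PRECONDITION & SPEC =====
-- Python A raises IndexError at values[idx] when values has fewer rows than times.
def Pre_merge_feeds (times : List (List Int)) (values : List (List Int)) : Prop :=
  times.length ≤ values.length
instance (times : List (List Int)) (values : List (List Int)) : Decidable (Pre_merge_feeds times values) := by unfold Pre_merge_feeds; infer_instance
def pvWitness_merge_feeds : List (List Int) × List (List Int) := ([[1, 3], [2, 3]], [[10, 30], [20, 31]])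
def Spec_merge_feeds (times : List (List Int)) (values : List (List Int)) (out : List Int × List Int) : Prop := out = merge_feeds_alt times values
instance (times : List (List Int)) (values : List (List Int)) (out : List Int × List Int) : Decidable (Spec_merge_feeds times values out) := by unfold Spec_merge_feeds; infer_instance

-- ===== CLAIM (what is proved, stated in full; the proofs are below) =====
def Claim_equal_merge_feeds : Prop := ∀ (times : List (List Int)) (values : List (List Int)), Dom_merge_feeds times values → Pre_merge_feeds times values → Spec_merge_feeds times values (merge_feeds times values)

-- ===== LEMMAS AND PROOFS =====

-- one conditional update of A's running vector, per feed
def pvStep (d : PySem.Dict Int Int) (c t : Int) : Int := if d.contains t then d.getD t 0 else c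

-- forward-filled value of a sorted item list at time t (B's viewpoint)
def pvLat (items : List (Int × Int)) (t c : Int) : Int :=
  ((items.filter (fun p => decide (p.1 ≤ t))).map (·.2)).getLastD c

-- forward-filled value read off the merged timeline (A's viewpoint)
def pvLA (d : PySem.Dict Int Int) (c : Int) (m : List Int) (t : Int) : Int :=
  ((m.filter (fun u => decide (u ≤ t) && d.contains u)).map (fun u => d.getD u 0)).getLastD c

-- A's running value of ONE feed along the timeline
def pvSeries (d : PySem.Dict Int Int) (c : Int) : List Int → List Int
  | [] => []
  | t :: ts => pvStep d c t :: pvSeries d (pvStep d c t) ts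

-- A's whole sweep, recursively
def pvSweep (ds : List (PySem.Dict Int Int)) (r : List Int) : List Int → List Int
  | [] => []
  | t :: ts =>
    (List.zipWith (fun d c => pvStep d c t) ds r).sum ::
      pvSweep ds (List.zipWith (fun d c => pvStep d c t) ds r) ts

lemma pv_getLastD_append (A B : List Int) (c : Int) :
    (A ++ B).getLastD c = B.getLastD (A.getLastD c) := by
  induction A generalizing c with
  | nil => rfl
  | cons a as ih => simp only [List.cons_append, List.getLastD_cons, ih]

lemma pv_foldl_range_getD {α β : Type} (l : List α) (dfl : α) (h : β → α → β) (z : β) :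
    (List.range l.length).foldl (fun s i => h s (l.getD i dfl)) z = l.foldl h z := by
  induction l generalizing z with
  | nil => simp
  | cons a l ih =>
    simp only [List.length_cons, List.range_succ_eq_map, List.foldl_cons, List.foldl_map,
      List.getD_cons_zero, List.getD_cons_succ]
    exact ih (h z a)

lemma pv_set_eq (times : List (List Int)) :
    (PySem.List.pyRange 0 times.length 1).foldl
      (fun (s : PySem.Set Int) idx => PySem.Set.update s (PySem.List.pyGetD times idx []))
      PySem.Set.empty
    = PySem.Set.ofList (times.flatMap (fun x => x)) := by
  rw [show (times.length : Int) = ((times.length : Nat) : Int) from rfl,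
    PySem.List.pyRange_zero_natCast, List.foldl_map]
  simp only [PySem.List.pyGetD_natCast]
  rw [pv_foldl_range_getD times [] (fun s xs => PySem.Set.update s xs) PySem.Set.empty]
  rw [show PySem.Set.ofList (times.flatMap (fun x => x))
      = (times.flatMap (fun x => x)).foldl PySem.Set.add PySem.Set.empty from rfl]
  rw [List.flatMap_id', List.foldl_flatten]
  rfl

lemma pv_ttv (times values : List (List Int)) (h : times.length ≤ values.length) :
    (PySem.List.pyRange 0 times.length 1).map
      (fun idx => PySem.Dict.ofList ((PySem.List.pyGetD times idx []).zip (PySem.List.pyGetD values idx [])))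
    = (times.zip values).map (fun fv => PySem.Dict.ofList (fv.1.zip fv.2)) := by
  rw [show (times.length : Int) = ((times.length : Nat) : Int) from rfl,
    PySem.List.pyRange_zero_natCast, List.map_map]
  apply List.ext_getElem
  · simp [List.length_zip]; omega
  intro i h1 h2
  have hit : i < times.length := by simpa using h1
  have hiv : i < values.length := by omega
  simp only [List.getElem_map, List.getElem_range, Function.comp, PySem.List.pyGetD_natCast,
    List.getElem_zip, List.getD_eq_getElem _ _ hit, List.getD_eq_getElem _ _ hiv]

lemma pv_fold_set_len (ds : List (PySem.Dict Int Int)) (t : Int) (n : Nat) (r : List Int) :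
    ((List.range n).foldl
      (fun (r : List Int) i =>
        if (ds.getD i PySem.Dict.empty).contains t then
          r.set i ((ds.getD i PySem.Dict.empty).getD t 0)
        else r) r).length = r.length := by
  induction n with
  | zero => simp
  | succ n ih =>
    rw [List.range_succ, List.foldl_append, List.foldl_cons, List.foldl_nil]
    split
    · rw [List.length_set, ih]
    · exact ih

lemma pv_fold_set_get (ds : List (PySem.Dict Int Int)) (t : Int) (n : Nat) (r : List Int) (j : Nat) :
    ((List.range n).foldl
      (fun (r : List Int) i =>
        if (ds.getD i PySem.Dict.empty).contains t then
          r.set i ((ds.getD i PySem.Dict.empty).getD t 0)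
        else r) r)[j]?
    = if j < n then r[j]?.map (fun c => pvStep (ds.getD j PySem.Dict.empty) c t) else r[j]? := by
  induction n with
  | zero => simp
  | succ n ih =>
    rw [List.range_succ, List.foldl_append, List.foldl_cons, List.foldl_nil]
    have hlen := pv_fold_set_len ds t n r
    by_cases hc : (ds.getD n PySem.Dict.empty).contains t
    · simp only [hc, if_true]
      rw [List.getElem?_set]
      by_cases hj : n = j
      · subst hj
        rw [hlen, if_pos rfl, if_pos (by omega : n < n + 1)]
        by_cases hr : n < r.length
        · rw [if_pos hr, List.getElem?_eq_getElem hr, Option.map_some]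
          simp only [pvStep, hc, if_true]
        · rw [if_neg hr, List.getElem?_eq_none (by omega), Option.map_none]
      · rw [if_neg hj, ih]
        by_cases hjn : j < n
        · rw [if_pos hjn, if_pos (by omega)]
        · rw [if_neg hjn, if_neg (by omega)]
    · simp only [hc, Bool.false_eq_true, if_false]
      rw [ih]
      by_cases hj : j < n
      · rw [if_pos hj, if_pos (by omega)]
      · by_cases hj2 : j < n + 1
        · have hjn : j = n := by omega
          subst hjn
          rw [if_neg hj, if_pos hj2]
          have : (fun c => pvStep (ds.getD j PySem.Dict.empty) c t) = fun c => c := by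
            funext c; unfold pvStep; rw [if_neg hc]
          rw [this, Option.map_id']
        · rw [if_neg hj, if_neg hj2]

lemma pv_inner_eq (ds : List (PySem.Dict Int Int)) (t : Int) (r : List Int)
    (h : r.length = ds.length) :
    (PySem.List.pyRange 0 ds.length 1).foldl
      (fun (r : List Int) idx =>
        if (PySem.List.pyGetD ds idx PySem.Dict.empty).contains t then
          r.set idx.toNat ((PySem.List.pyGetD ds idx PySem.Dict.empty).getD t 0)
        else r) r
    = List.zipWith (fun d c => pvStep d c t) ds r := by
  rw [show (ds.length : Int) = ((ds.length : Nat) : Int) from rfl,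
    PySem.List.pyRange_zero_natCast, List.foldl_map]
  simp only [PySem.List.pyGetD_natCast, Int.toNat_natCast]
  apply List.ext_getElem?
  intro j
  rw [pv_fold_set_get, List.getElem?_zipWith]
  by_cases hj : j < ds.length
  · have hjr : j < r.length := by omega
    rw [if_pos hj, List.getElem?_eq_getElem hj, List.getElem?_eq_getElem hjr,
      List.getD_eq_getElem _ _ hj]
    rfl
  · rw [if_neg hj, List.getElem?_eq_none (by omega : ds.length ≤ j),
      List.getElem?_eq_none (by omega : r.length ≤ j)]

lemma pv_sweepA (ds : List (PySem.Dict Int Int)) (m : List Int) :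
    ∀ (r out : List Int), r.length = ds.length →
    (m.foldl
      (fun (st2 : List Int × List Int) t =>
        let running := (PySem.List.pyRange 0 ds.length 1).foldl
          (fun (r : List Int) idx =>
            if (PySem.List.pyGetD ds idx PySem.Dict.empty).contains t then
              r.set idx.toNat ((PySem.List.pyGetD ds idx PySem.Dict.empty).getD t 0)
            else r)
          st2.1
        (running, st2.2 ++ [running.sum]))
      (r, out)).2 = out ++ pvSweep ds r m := by
  induction m with
  | nil => simp [pvSweep]
  | cons t ts ih =>
    intro r out h
    rw [List.foldl_cons]
    show (ts.foldl _ (_, out ++ [_])).2 = _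
    rw [pv_inner_eq ds t r h]
    rw [ih (List.zipWith (fun d c => pvStep d c t) ds r) (out ++ [(List.zipWith (fun d c => pvStep d c t) ds r).sum])
      (by rw [List.length_zipWith]; omega)]
    rw [pvSweep, List.append_assoc, List.singleton_append]

lemma pv_sweep_zero (m : List Int) : ∀ r, pvSweep [] r m = List.replicate m.length 0 := by
  induction m with
  | nil => intro r; rfl
  | cons t ts ih =>
    intro r
    rw [pvSweep, List.zipWith_nil_left, List.sum_nil, ih, List.length_cons, List.replicate_succ]

lemma pv_sweep_cons (d : PySem.Dict Int Int) (ds : List (PySem.Dict Int Int)) (m : List Int) :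
    ∀ c cs, pvSweep (d :: ds) (c :: cs) m
      = List.zipWith (· + ·) (pvSeries d c m) (pvSweep ds cs m) := by
  induction m with
  | nil => intro c cs; rfl
  | cons t ts ih =>
    intro c cs
    rw [pvSweep, pvSweep, pvSeries, List.zipWith_cons_cons, List.zipWith_cons_cons, List.sum_cons,
      ih]

lemma pv_sweep_foldr (ds : List (PySem.Dict Int Int)) (m : List Int) :
    pvSweep ds (List.replicate ds.length 0) m
      = ds.foldr (fun d acc => List.zipWith (· + ·) (pvSeries d 0 m) acc)
          (List.replicate m.length 0) := by
  induction ds with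
  | nil => exact pv_sweep_zero m []
  | cons d ds ih =>
    rw [List.length_cons, List.replicate_succ, pv_sweep_cons, ih, List.foldr_cons]

lemma pv_series_map (d : PySem.Dict Int Int) (m : List Int) (hm : m.Pairwise (· < ·)) :
    ∀ c, pvSeries d c m = m.map (pvLA d c m) := by
  induction m with
  | nil => intro c; rfl
  | cons t ts ih =>
    rw [List.pairwise_cons] at hm
    intro c
    have hfil : ts.filter (fun u => decide (u ≤ t) && d.contains u) = [] := by
      apply List.filter_eq_nil_iff.mpr
      intro u hu
      have := hm.1 u hu
      simp [show ¬ u ≤ t by omega]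
    have hhead : pvLA d c (t :: ts) t = pvStep d c t := by
      unfold pvLA pvStep
      rw [List.filter_cons, hfil]
      simp only [decide_true, le_refl, Bool.true_and]
      cases hc : d.contains t <;> simp
    have htail : ∀ w ∈ ts, pvLA d (pvStep d c t) ts w = pvLA d c (t :: ts) w := by
      intro w hw
      unfold pvLA pvStep
      rw [List.filter_cons]
      have : decide (t ≤ w) = true := by simp; have := hm.1 w hw; omega
      rw [this, Bool.true_and]
      cases hc : d.contains t
      · simp
      · simp only [if_true, List.map_cons, List.getLastD_cons]
    rw [pvSeries, ih hm.2, List.map_cons, hhead]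
    exact congrArg _ (List.map_congr_left htail)

lemma pv_drop_gt (t : Int) : ∀ (items : List (Int × Int)),
    items.Pairwise (fun p q => p.1 ≤ q.1) →
    ∀ q ∈ items.dropWhile (fun p => decide (p.1 ≤ t)), t < q.1 := by
  intro items h
  induction items with
  | nil => simp
  | cons p rest ih =>
    rw [List.pairwise_cons] at h
    by_cases hp : p.1 ≤ t
    · rw [List.dropWhile_cons_of_pos (by simpa using hp)]
      exact ih h.2
    · rw [List.dropWhile_cons_of_neg (by simpa using hp)]
      intro q hq
      rcases List.mem_cons.mp hq with rfl | hq2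
      · omega
      · have := h.1 q hq2; omega

lemma pv_adv (t : Int) : ∀ (items : List (Int × Int)),
    items.Pairwise (fun p q => p.1 ≤ q.1) → ∀ c,
    mfAdvance items c t = (items.dropWhile (fun p => decide (p.1 ≤ t)), pvLat items t c) := by
  intro items h
  induction items with
  | nil => intro c; rfl
  | cons p rest ih =>
    rw [List.pairwise_cons] at h
    intro c
    by_cases hp : p.1 ≤ t
    · rw [show mfAdvance (p :: rest) c t
          = if p.1 ≤ t then mfAdvance rest p.2 t else (p :: rest, c) from rfl, if_pos hp]
      rw [ih h.2 p.2, List.dropWhile_cons_of_pos (by simpa using hp)]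
      unfold pvLat
      rw [List.filter_cons_of_pos (by simpa using hp), List.map_cons, List.getLastD_cons]
    · rw [show mfAdvance (p :: rest) c t
          = if p.1 ≤ t then mfAdvance rest p.2 t else (p :: rest, c) from rfl, if_neg hp]
      unfold pvLat
      rw [List.filter_cons_of_neg (by simpa using hp)]
      rw [List.filter_eq_nil_iff.mpr (by
        intro q hq
        have := h.1 q hq
        simp; omega)]
      rw [List.dropWhile_cons_of_neg (by simpa using hp)]
      rfl

lemma pv_shift (items : List (Int × Int)) (hs : items.Pairwise (fun p q => p.1 ≤ q.1))
    (t w c : Int) (htw : t ≤ w) :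
    pvLat items w c
      = pvLat (items.dropWhile (fun p => decide (p.1 ≤ t))) w (pvLat items t c) := by
  have hsplit : items.takeWhile (fun p => decide (p.1 ≤ t))
      ++ items.dropWhile (fun p => decide (p.1 ≤ t)) = items :=
    List.takeWhile_append_dropWhile
  have htake : ∀ p ∈ items.takeWhile (fun p : Int × Int => decide (p.1 ≤ t)), p.1 ≤ t := by
    intro p hp; simpa using List.mem_takeWhile_imp hp
  have hdrop := pv_drop_gt t items hs
  have hft : items.filter (fun p => decide (p.1 ≤ t))
      = items.takeWhile (fun p => decide (p.1 ≤ t)) := by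
    conv_lhs => rw [← hsplit]
    rw [List.filter_append,
      List.filter_eq_self.mpr (fun p hp => by simpa using htake p hp),
      List.filter_eq_nil_iff.mpr (fun q hq => by have := hdrop q hq; simp; omega),
      List.append_nil]
  unfold pvLat
  conv_lhs => rw [← hsplit]
  rw [List.filter_append, List.map_append, pv_getLastD_append,
    show List.filter (fun p => decide (p.1 ≤ w)) (List.takeWhile (fun p => decide (p.1 ≤ t)) items)
        = List.takeWhile (fun p => decide (p.1 ≤ t)) items from
      List.filter_eq_self.mpr (fun p hp => by have := htake p hp; simp; omega), hft]

lemma pv_fill_map : ∀ (L : List (Int × Int)) (items : List (Int × Int)) (c : Int),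
    items.Pairwise (fun p q => p.1 ≤ q.1) →
    L.Pairwise (fun p q => p.1 ≤ q.1) →
    mfFill items c L = L.map (fun ta => ta.2 + pvLat items ta.1 c) := by
  intro L
  induction L with
  | nil => intros; rfl
  | cons ta rest ih =>
    intro items c hitems hL
    rw [List.pairwise_cons] at hL
    rw [show mfFill items c (ta :: rest)
        = (match mfAdvance items c ta.1 with
           | (items', cur') => (ta.2 + cur') :: mfFill items' cur' rest) from rfl]
    rw [pv_adv ta.1 items hitems c]
    show (ta.2 + pvLat items ta.1 c) :: mfFill _ _ rest = _
    rw [List.map_cons]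
    congr 1
    rw [ih _ _ (hitems.sublist (List.dropWhile_sublist _)) hL.2]
    apply List.map_congr_left
    intro q hq
    rw [← pv_shift items hitems ta.1 q.1 c (hL.1 q hq)]

lemma pv_zip_pairwise {α : Type} (l : List Int) (l' : List α) (h : l.Pairwise (· ≤ ·)) :
    (l.zip l').Pairwise (fun p q => p.1 ≤ q.1) := by
  induction l generalizing l' with
  | nil => simp
  | cons a l ih =>
    cases l' with
    | nil => simp
    | cons b l'' =>
      rw [List.pairwise_cons] at h
      rw [List.zip_cons_cons]
      refine List.pairwise_cons.mpr ⟨?_, ih l'' h.2⟩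
      intro q hq
      exact h.1 q.1 (List.of_mem_zip hq).1

lemma pv_map_zip {α β γ : Type} (l : List α) (l' : List β) (f : α → β → γ) :
    (l.zip l').map (fun p => f p.1 p.2) = List.zipWith f l l' := by
  induction l generalizing l' with
  | nil => simp
  | cons a l ih =>
    cases l' with
    | nil => simp
    | cons b l'' => rw [List.zip_cons_cons, List.map_cons, List.zipWith_cons_cons, ih]

lemma pv_bridge (ft fvs : List Int) (m : List Int) (hm : m.Pairwise (· < ·))
    (hsub : ∀ x ∈ ft, x ∈ m) (t : Int) :
    pvLA (PySem.Dict.ofList (ft.zip fvs)) 0 m t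
      = pvLat (PySem.List.sorted (PySem.Dict.ofList (ft.zip fvs)).items (fun kv => kv.1) false) t 0 := by
  set d := PySem.Dict.ofList (ft.zip fvs) with hd
  set items := PySem.List.sorted d.items (fun kv => kv.1) false with hitems
  have hperm : items.Perm d.items := PySem.List.sorted_perm _ _ _
  have hnd : d.keys.Nodup := PySem.Dict.nodup_keys_ofList _
  have hndmap : (items.map (fun p => p.1)).Nodup :=
    ((hperm.map (fun p : Int × Int => p.1)).nodup_iff).mpr
      (by rw [show d.items.map (fun p : Int × Int => p.1) = d.keys from rfl]; exact hnd)
  have hle : items.Pairwise (fun p q => p.1 ≤ q.1) := PySem.List.sorted_pairwise _ _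
  have hlt : items.Pairwise (fun p q => p.1 < q.1) :=
    (hle.and (List.pairwise_map.mp hndmap)).imp (fun h => lt_of_le_of_ne h.1 h.2)
  have hmemkeys : ∀ u, u ∈ d.keys → u ∈ m := by
    intro u hu
    rw [hd, show PySem.Dict.ofList (ft.zip fvs)
        = (ft.zip fvs).foldl (fun d p => d.insert p.1 p.2) PySem.Dict.empty from rfl,
      PySem.Dict.keys_foldl_insert_key (ft.zip fvs) (fun p => p.1) (fun _ p => p.2)
        PySem.Dict.empty] at hu
    rw [show PySem.Dict.empty.keys = ([] : List Int) from rfl,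
      show PySem.Set.update ([] : PySem.Set Int) ((ft.zip fvs).map (fun p => p.1))
        = PySem.Set.ofList ((ft.zip fvs).map (fun p => p.1)) from rfl,
      PySem.Set.mem_ofList] at hu
    obtain ⟨p, hp, hpu⟩ := List.mem_map.mp hu
    exact hsub u (hpu ▸ (List.of_mem_zip hp).1)
  have hkeyiff : ∀ u, u ∈ d.keys ↔ ∃ p ∈ items, p.1 = u := by
    intro u
    rw [show d.keys = d.items.map (fun p => p.1) from rfl]
    constructor
    · intro hu
      obtain ⟨p, hp, hpu⟩ := List.mem_map.mp hu
      exact ⟨p, hperm.mem_iff.mpr hp, hpu⟩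
    · rintro ⟨p, hp, rfl⟩
      exact List.mem_map.mpr ⟨p, hperm.mem_iff.mp hp, rfl⟩
  have hCK : m.filter (fun u => decide (u ≤ t) && d.contains u)
      = (items.filter (fun p => decide (p.1 ≤ t))).map (fun p => p.1) := by
    apply PySem.List.eq_of_perm_of_pairwise_le_of_injective (fun x : Int => x)
      (fun a b hab => hab)
    · apply (List.perm_ext_iff_of_nodup ?_ ?_).mpr
      · intro u
        rw [List.mem_filter, List.mem_map]
        constructor
        · rintro ⟨_, hcond⟩
          rw [Bool.and_eq_true, decide_eq_true_eq] at hcond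
          obtain ⟨p, hp, hpu⟩ := (hkeyiff u).mp ((PySem.Dict.contains_iff_mem_keys d u).mp hcond.2)
          exact ⟨p, List.mem_filter.mpr ⟨hp, by rw [hpu]; simpa using hcond.1⟩, hpu⟩
        · rintro ⟨p, hp, rfl⟩
          rw [List.mem_filter] at hp
          have hk : p.1 ∈ d.keys := (hkeyiff p.1).mpr ⟨p, hp.1, rfl⟩
          refine ⟨hmemkeys _ hk, ?_⟩
          rw [Bool.and_eq_true]
          exact ⟨hp.2, (PySem.Dict.contains_iff_mem_keys d p.1).mpr hk⟩
      · exact List.Pairwise.imp (fun h => ne_of_lt h) (hm.sublist List.filter_sublist)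
      · exact List.Pairwise.imp (fun h => ne_of_lt h)
          (List.pairwise_map.mpr (hlt.sublist List.filter_sublist))
    · exact List.Pairwise.imp (fun h => le_of_lt h) (hm.sublist List.filter_sublist)
    · exact List.Pairwise.imp (fun h => le_of_lt h)
        (List.pairwise_map.mpr (hlt.sublist List.filter_sublist))
  unfold pvLA pvLat
  rw [hCK, List.map_map]
  congr 1
  apply List.map_congr_left
  intro p hp
  obtain ⟨k, v⟩ := p
  have hpd : (k, v) ∈ d.items := hperm.mem_iff.mp (List.mem_of_mem_filter hp)
  exact PySem.Dict.getD_of_mem_items d hpd hnd 0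

lemma pv_zip_left_comm (a b c : List Int) :
    List.zipWith (· + ·) a (List.zipWith (· + ·) b c)
      = List.zipWith (· + ·) b (List.zipWith (· + ·) a c) := by
  induction a generalizing b c with
  | nil => simp
  | cons x a ih =>
    cases b with
    | nil => simp
    | cons y b =>
      cases c with
      | nil => simp
      | cons z c =>
        simp only [List.zipWith_cons_cons]
        rw [ih]
        congr 1
        ring

lemma pv_foldr_init (L : List (List Int)) : ∀ (z v : List Int),
    L.foldr (fun v a => List.zipWith (· + ·) v a) (List.zipWith (· + ·) z v)
      = List.zipWith (· + ·) v (L.foldr (fun v a => List.zipWith (· + ·) v a) z) := by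
  induction L with
  | nil =>
    intro z v
    exact List.zipWith_comm_of_comm (fun x y => Int.add_comm x y)
  | cons w L ih =>
    intro z v
    rw [List.foldr_cons, List.foldr_cons, ih, pv_zip_left_comm]

lemma pv_foldl_eq_foldr (L : List (List Int)) : ∀ (z : List Int),
    L.foldl (fun a v => List.zipWith (· + ·) a v) z
      = L.foldr (fun v a => List.zipWith (· + ·) v a) z := by
  induction L with
  | nil => intro z; rfl
  | cons v L ih =>
    intro z
    rw [List.foldl_cons, ih, List.foldr_cons, ← pv_foldr_init]

lemma pv_foldr_congr_mem {α β : Type} (l : List α) (f g : α → β → β) (z : β)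
    (h : ∀ x ∈ l, ∀ acc, f x acc = g x acc) : l.foldr f z = l.foldr g z := by
  induction l with
  | nil => rfl
  | cons a l ih =>
    rw [List.foldr_cons, List.foldr_cons, ih (fun x hx => h x (List.mem_cons_of_mem a hx)),
      h a List.mem_cons_self]

lemma pv_main (times values : List (List Int)) (h : times.length ≤ values.length) :
    merge_feeds times values = merge_feeds_alt times values := by
  simp only [merge_feeds, merge_feeds_alt]
  rw [PySem.List.foldl_prod_mk
        (f := fun (acc : List (PySem.Dict Int Int)) idx => acc ++ [PySem.Dict.ofList ((PySem.List.pyGetD times idx []).zip (PySem.List.pyGetD values idx []))])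
        (g := fun (s : PySem.Set Int) idx => PySem.Set.update s (PySem.List.pyGetD times idx []))]
  simp only [PySem.List.foldl_append_singleton_eq_map, List.nil_append]
  rw [pv_set_eq times, pv_ttv times values h]
  have hds : times.length
      = ((times.zip values).map (fun fv => PySem.Dict.ofList (fv.1.zip fv.2))).length := by
    rw [List.length_map, List.length_zip]; omega
  rw [hds]
  rw [pv_sweepA ((times.zip values).map (fun fv => PySem.Dict.ofList (fv.1.zip fv.2)))
    (PySem.List.sorted (PySem.Set.ofList (times.flatMap fun x => x)) (fun x => x) false)
    (List.replicate ((times.zip values).map (fun fv => PySem.Dict.ofList (fv.1.zip fv.2))).length 0)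
    [] (by rw [List.length_replicate])]
  rw [List.nil_append, pv_sweep_foldr, List.foldr_map]
  congr 1
  set m := PySem.List.sorted (PySem.Set.ofList (List.flatMap (fun x => x) times)) (fun x => x) false with hmdef
  have hmlt : m.Pairwise (· < ·) := PySem.List.sorted_ofList_pairwise_lt _
  have hmle : m.Pairwise (· ≤ ·) := hmlt.imp (fun hx => le_of_lt hx)
  have hsubm : ∀ fv ∈ times.zip values, ∀ x ∈ fv.1, x ∈ m := by
    intro fv hfv x hx
    rw [hmdef, PySem.List.mem_sorted, PySem.Set.mem_ofList]
    exact List.mem_flatMap.mpr ⟨fv.1, (List.of_mem_zip hfv).1, hx⟩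
  rw [pv_foldr_congr_mem (times.zip values) _
      (fun fv acc => List.zipWith (· + ·)
        (m.map (fun t => pvLat (PySem.List.sorted (PySem.Dict.ofList (fv.1.zip fv.2)).items (fun kv => kv.1) false) t 0)) acc)
      _
      (by
        intro fv hfv acc
        congr 1
        rw [pv_series_map _ _ hmlt 0]
        exact List.map_congr_left (fun t _ => pv_bridge fv.1 fv.2 m hmlt (hsubm fv hfv) t))]
  have hB : (times.zip values).foldl
        (fun out fv => mfFill (PySem.List.sorted (PySem.Dict.ofList (fv.1.zip fv.2)).items (fun kv => kv.1) false) 0 (m.zip out))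
        (List.replicate m.length 0)
      = (times.zip values).foldl
        (fun acc fv => List.zipWith (· + ·) acc
          (m.map (fun t => pvLat (PySem.List.sorted (PySem.Dict.ofList (fv.1.zip fv.2)).items (fun kv => kv.1) false) t 0)))
        (List.replicate m.length 0) :=
    PySem.List.foldl_congr_mem _ _ _ _
      (by
        intro acc fv hfv
        rw [pv_fill_map (m.zip acc) _ 0
          (by
            have := PySem.List.sorted_pairwise (PySem.Dict.ofList (fv.1.zip fv.2)).items (fun kv : Int × Int => kv.1)
            exact this)
          (pv_zip_pairwise m acc hmle)]
        rw [pv_map_zip m acc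
          (fun x y => y + pvLat (PySem.List.sorted (PySem.Dict.ofList (fv.1.zip fv.2)).items (fun kv => kv.1) false) x 0)]
        rw [List.zipWith_map_right, List.zipWith_comm])
  rw [hB]
  rw [List.foldr_map
    (f := fun fv : List Int × List Int =>
      m.map (fun t => pvLat (PySem.List.sorted (PySem.Dict.ofList (fv.1.zip fv.2)).items (fun kv => kv.1) false) t 0))
    (g := fun v a => List.zipWith (· + ·) v a) |>.symm]
  rw [List.foldl_map
    (f := fun fv : List Int × List Int =>
      m.map (fun t => pvLat (PySem.List.sorted (PySem.Dict.ofList (fv.1.zip fv.2)).items (fun kv => kv.1) false) t 0))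
    (g := fun a v => List.zipWith (· + ·) a v) |>.symm]
  rw [pv_foldl_eq_foldr]

-- ===== VERDICT (by name: the statement is the Claim_ definition above) =====
theorem merge_feeds_spec : Claim_equal_merge_feeds := by
  intro times values _ hpre
  unfold Spec_merge_feeds
  exact pv_main times values hpre
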